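-- pv_equiv track=rewrite | github.com/shekelboi/leetcode | 2441. Largest Positive Integer That Exists With Its Negative.py | find_max_k_optimized
-- ===== SOURCE A (Python) =====
-- def find_max_k_optimized(nums):
--     nums_set = set()
--     max_num = -1
--     for n in nums:
--         inverse = -1 * n
--         if inverse not in nums_set:
--             nums_set.add(n)
--         else:
--             val = abs(n)
--             if val > max_num:
--                 max_num = val
--             nums_set.remove(inverse)
--
--     return max_num
-- ===== SOURCE B (Python) =====
-- def find_max_k_optimized(nums):
--     a = sorted(nums)
--     l, r = 0, len(a) - 1
--     while l < r:
--         s = a[l] + a[r]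
--         if s == 0:
--             return a[r]
--         if s < 0:
--             l += 1
--         else:
--             r -= 1
--     return -1
-- ===== Notes on version B (the rewrite author's own statement) =====
-- stated objective: alternative
-- what changed: Replaced the single-pass hash-set pair-matcher by sorting the list and running a two-pointer scan from both ends, returning the right element of the first zero-sum pair found.
import Mathlib
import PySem

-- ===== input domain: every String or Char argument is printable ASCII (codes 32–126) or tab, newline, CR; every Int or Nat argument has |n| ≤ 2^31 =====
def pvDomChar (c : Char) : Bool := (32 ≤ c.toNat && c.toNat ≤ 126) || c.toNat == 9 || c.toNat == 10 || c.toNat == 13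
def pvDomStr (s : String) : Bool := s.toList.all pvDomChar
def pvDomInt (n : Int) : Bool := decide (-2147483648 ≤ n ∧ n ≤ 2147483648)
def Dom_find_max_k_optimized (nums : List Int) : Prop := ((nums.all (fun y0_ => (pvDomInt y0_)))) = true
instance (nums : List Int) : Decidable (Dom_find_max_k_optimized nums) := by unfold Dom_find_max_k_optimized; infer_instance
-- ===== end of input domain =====

-- B replaces A's one-pass hash-set pair-matcher by sort + two-pointer scan (alternative algorithm, same results).


-- ===== PORT A =====
-- loop body of A: state is (nums_set, max_num).  In the else-branch Python's set.remove(inverse)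
-- cannot raise (inverse is in the set there), so `(remove? …).getD st.1` is exact.
def stepA (st : PySem.Set Int × Int) (n : Int) : PySem.Set Int × Int :=
  let inverse := -1 * n
  if (PySem.Set.contains st.1 inverse) = false then
    (PySem.Set.add st.1 n, st.2)
  else
    let val := |n|
    ((PySem.Set.remove? st.1 inverse).getD st.1, if val > st.2 then val else st.2)

def find_max_k_optimized (nums : List Int) : Int :=
  (nums.foldl stepA ((PySem.Set.empty : PySem.Set Int), -1)).2

-- ===== PORT B =====
-- while l < r: …  Python's r starts at len(a)-1 (an int, -1 on the empty list); the Nat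
-- truncation len-1 = 0 skips the loop there exactly as Python does.  Inside the loop
-- 0 ≤ l < r < len(a), so a[l]/a[r] never raise and getD's default is never read.
def twoPtr (a : List Int) (l r : Nat) : Int :=
  if h : l < r then
    let s := a.getD l 0 + a.getD r 0
    if s = 0 then a.getD r 0
    else if s < 0 then twoPtr a (l + 1) r
    else twoPtr a l (r - 1)
  else -1
termination_by r - l
decreasing_by all_goals omega

def find_max_k_optimized_alt (nums : List Int) : Int :=
  twoPtr (PySem.List.sorted nums (fun x => x) false) 0 (nums.length - 1)

-- ===== PRECONDITION & SPEC =====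
def Spec_find_max_k_optimized (nums : List Int) (out : Int) : Prop := out = find_max_k_optimized_alt nums
instance (nums : List Int) (out : Int) : Decidable (Spec_find_max_k_optimized nums out) := by unfold Spec_find_max_k_optimized; infer_instance

-- ===== CLAIM (what is proved, stated in full; the proofs are below) =====
def Claim_equal_find_max_k_optimized : Prop := ∀ (nums : List Int), Dom_find_max_k_optimized nums → Spec_find_max_k_optimized nums (find_max_k_optimized nums)

-- ===== LEMMAS AND PROOFS =====

-- Pk nums k: k is a value both programs may report: either k > 0 with k and -k present,
-- or k = 0 with at least two zeros present.
def Pk (nums : List Int) (k : Int) : Prop :=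
  (0 < k ∧ k ∈ nums ∧ -k ∈ nums) ∨ (k = 0 ∧ 2 ≤ nums.count 0)

lemma Pk_nonneg {nums : List Int} {k : Int} (h : Pk nums k) : 0 ≤ k := by
  rcases h with ⟨h, _⟩ | ⟨h, _⟩ <;> omega

lemma Pk_append {nums : List Int} {k : Int} (n : Int) (h : Pk nums k) : Pk (nums ++ [n]) k := by
  rcases h with ⟨h1, h2, h3⟩ | ⟨h1, h2⟩
  · exact Or.inl ⟨h1, List.mem_append_left _ h2, List.mem_append_left _ h3⟩
  · refine Or.inr ⟨h1, ?_⟩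
    rw [List.count_append]; omega

lemma Pk_perm {xs ys : List Int} (h : xs.Perm ys) {k : Int} : Pk xs k ↔ Pk ys k := by
  unfold Pk
  rw [h.mem_iff, h.mem_iff, h.count_eq]

-- the common characterisation of the result of both programs
def GoodOut (nums : List Int) (r : Int) : Prop :=
  (r = -1 ∨ Pk nums r) ∧ ∀ k, Pk nums k → k ≤ r

lemma goodOut_unique {nums : List Int} {r r' : Int}
    (h : GoodOut nums r) (h' : GoodOut nums r') : r = r' := by
  obtain ⟨h1, h2⟩ := h
  obtain ⟨h1', h2'⟩ := h'
  rcases h1 with rfl | hp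
  · rcases h1' with rfl | hp'
    · rfl
    · have := h2 r' hp'
      have := Pk_nonneg hp'
      omega
  · rcases h1' with rfl | hp'
    · have := h2' r hp
      have := Pk_nonneg hp
      omega
    · exact le_antisymm (h2' r hp) (h2 r' hp')

-- A's loop invariant over the processed prefix p with state (S, m)
def InvA (p : List Int) (S : PySem.Set Int) (m : Int) : Prop :=
  (∀ v ∈ S, v ∈ p) ∧
  (∀ v, v ∈ S → -v ∈ S → v = 0) ∧
  (∀ k : Int, 0 < k → ¬(k ∈ p ∧ -k ∈ p) → ((k ∈ p ↔ k ∈ S) ∧ (-k ∈ p ↔ -k ∈ S))) ∧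
  ((0:Int) ∈ S ↔ p.count 0 % 2 = 1) ∧
  (m = -1 ∨ Pk p m) ∧
  (∀ k, Pk p k → k ≤ m)

lemma stepA_of_not_mem (S : PySem.Set Int) (m n : Int) (h : -n ∉ S) :
    stepA (S, m) n = (PySem.Set.add S n, m) := by
  simp [stepA, h]

lemma stepA_of_mem (S : PySem.Set Int) (m n : Int) (h : -n ∈ S) :
    stepA (S, m) n = (PySem.Set.discard S (-n), if |n| > m then |n| else m) := by
  simp [stepA, h, PySem.Set.remove?_of_mem h]

lemma stepA_inv (p : List Int) (S : PySem.Set Int) (m n : Int) (hInv : InvA p S m) :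
    InvA (p ++ [n]) (stepA (S, m) n).1 (stepA (S, m) n).2 := by
  obtain ⟨h1, h2, h3, h4, h5, h6⟩ := hInv
  by_cases hc : -n ∈ S
  · -- else branch: match found, record |n| and remove the inverse
    rw [stepA_of_mem S m n hc]
    have hnp' : n ∈ p ++ [n] := List.mem_append_right _ (List.mem_singleton_self n)
    have hmnp' : -n ∈ p ++ [n] := List.mem_append_left _ (h1 _ hc)
    have hPkabs : Pk (p ++ [n]) |n| := by
      by_cases hn0 : n = 0
      · subst hn0
        have hcount : 1 ≤ p.count 0 := by
          have := h4.mp (by simpa using hc)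
          omega
        refine Or.inr ⟨by simp, ?_⟩
        have hone : ([(0:Int)].count 0) = 1 := rfl
        rw [List.count_append, hone]; omega
      · refine Or.inl ⟨abs_pos.mpr hn0, ?_, ?_⟩
        · rcases abs_cases n with ⟨he, _⟩ | ⟨he, _⟩ <;> rw [he]
          · exact hnp'
          · exact hmnp'
        · rcases abs_cases n with ⟨he, _⟩ | ⟨he, _⟩ <;> rw [he]
          · exact hmnp'
          · simpa using hnp'
    have hm' : m ≤ (if |n| > m then |n| else m) := by
      by_cases hcmp : m < |n|
      · rw [if_pos hcmp]; omega
      · rw [if_neg hcmp]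
    have habs' : |n| ≤ (if |n| > m then |n| else m) := by
      by_cases hcmp : m < |n|
      · rw [if_pos hcmp]
      · rw [if_neg hcmp]; omega
    refine ⟨?_, ?_, ?_, ?_, ?_, ?_⟩
    · intro v hv
      exact List.mem_append_left _ (h1 v ((PySem.Set.mem_discard S (-n) v).mp hv).1)
    · intro v hv hv'
      exact h2 v ((PySem.Set.mem_discard S (-n) v).mp hv).1 ((PySem.Set.mem_discard S (-n) (-v)).mp hv').1
    · intro k hk hkp'
      by_cases hkabs : k = |n|
      · exfalso
        apply hkp'
        constructor
        · rcases abs_cases n with ⟨he, _⟩ | ⟨he, _⟩ <;> rw [hkabs, he]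
          · exact hnp'
          · exact hmnp'
        · rcases abs_cases n with ⟨he, _⟩ | ⟨he, _⟩ <;> rw [hkabs, he]
          · exact hmnp'
          · simpa using hnp'
      · have hkn : k ≠ n ∧ k ≠ -n ∧ -k ≠ n ∧ -k ≠ -n := by
          rcases abs_cases n with ⟨he, _⟩ | ⟨he, _⟩ <;> constructor <;> try constructor
          all_goals omega
        have e1 : (k ∈ p ++ [n]) ↔ k ∈ p := by simp [hkn.1]
        have e2 : (-k ∈ p ++ [n]) ↔ -k ∈ p := by simp [hkn.2.2.1]
        have e3 : (k ∈ PySem.Set.discard S (-n)) ↔ k ∈ S := by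
          rw [PySem.Set.mem_discard]; simp [hkn.2.1]
        have e4 : (-k ∈ PySem.Set.discard S (-n)) ↔ -k ∈ S := by
          rw [PySem.Set.mem_discard]; simp [hkn.2.2.2]
        rw [e1, e2, e3, e4]
        exact h3 k hk (by rw [e1, e2] at hkp'; exact hkp')
    · by_cases hn0 : n = 0
      · subst hn0
        simp only [neg_zero] at hc
        have h40 := h4.mp hc
        have hF : ((0:Int) ∈ PySem.Set.discard S (-0)) ↔ False := by
          rw [PySem.Set.mem_discard]; simp
        have hone : ([(0:Int)].count 0) = 1 := rfl
        rw [hF, List.count_append, hone, false_iff]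
        omega
      · have e : ((0:Int) ∈ PySem.Set.discard S (-n)) ↔ (0:Int) ∈ S := by
          rw [PySem.Set.mem_discard]; simp; omega
        rw [e, List.count_append]
        simpa [hn0] using h4
    · right
      by_cases hcmp : m < |n|
      · rw [if_pos hcmp]
        exact hPkabs
      · rw [if_neg hcmp]
        rcases h5 with rfl | hp
        · exfalso
          have := abs_nonneg n
          omega
        · exact Pk_append n hp
    · intro k hk
      by_cases hkabs : k = |n|
      · rw [hkabs]; exact habs'
      · rcases hk with ⟨hk0, hk1, hk2⟩ | ⟨hk0, hk1⟩
        · have hkn : k ≠ n ∧ -k ≠ n := by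
            rcases abs_cases n with ⟨he, _⟩ | ⟨he, _⟩ <;> constructor <;> omega
          have : Pk p k := by
            refine Or.inl ⟨hk0, ?_, ?_⟩
            · rcases List.mem_append.mp hk1 with h | h
              · exact h
              · simp at h; omega
            · rcases List.mem_append.mp hk2 with h | h
              · exact h
              · simp at h; omega
          exact le_trans (h6 k this) hm'
        · subst hk0
          have hn0 : n ≠ 0 := by intro h; rw [h] at hkabs; simp at hkabs
          rw [List.count_append] at hk1
          simp [hn0] at hk1
          exact le_trans (h6 0 (Or.inr ⟨rfl, hk1⟩)) hm'
  · -- then branch: no match, add n to the set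
    rw [stepA_of_not_mem S m n hc]
    refine ⟨?_, ?_, ?_, ?_, ?_, ?_⟩
    · intro v hv
      rcases (PySem.Set.mem_add S n v).mp hv with h | rfl
      · exact List.mem_append_left _ (h1 v h)
      · exact List.mem_append_right _ (List.mem_singleton_self v)
    · intro v hv hv'
      rcases (PySem.Set.mem_add S n v).mp hv with h | he
      · rcases (PySem.Set.mem_add S n (-v)).mp hv' with h' | h'
        · exact h2 v h h'
        · exfalso; apply hc; rw [← h']; simpa using h
      · rcases (PySem.Set.mem_add S n (-v)).mp hv' with h' | h'
        · exfalso; apply hc; rw [← he]; exact h'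
        · omega
    · intro k hk hkp'
      by_cases hkabs : k = |n|
      · have hn0 : n ≠ 0 := by intro h; rw [h] at hkabs; simp at hkabs; omega
        have hnp' : n ∈ p ++ [n] := List.mem_append_right _ (List.mem_singleton_self n)
        have hnS' : n ∈ PySem.Set.add S n := (PySem.Set.mem_add S n n).mpr (Or.inr rfl)
        have hmnS' : -n ∉ PySem.Set.add S n := by
          intro h
          rcases (PySem.Set.mem_add S n (-n)).mp h with h | h
          · exact hc h
          · omega
        have hmnp' : -n ∉ p ++ [n] := by
          intro h
          apply hkp'
          rcases abs_cases n with ⟨he, _⟩ | ⟨he, _⟩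
          · exact ⟨by rw [hkabs, he]; exact hnp', by rw [hkabs, he]; exact h⟩
          · exact ⟨by rw [hkabs, he]; exact h, by rw [hkabs, he]; simpa using hnp'⟩
        rcases abs_cases n with ⟨he, _⟩ | ⟨he, _⟩
        · rw [hkabs, he]
          exact ⟨⟨fun _ => hnS', fun _ => hnp'⟩, ⟨fun h => absurd h hmnp', fun h => absurd h hmnS'⟩⟩
        · rw [hkabs, he]
          refine ⟨⟨fun h => absurd (by simpa using h) hmnp', fun h => absurd (by simpa using h) hmnS'⟩, ?_⟩
          simp only [neg_neg]
          exact ⟨fun _ => hnS', fun _ => hnp'⟩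
      · have hkn : k ≠ n ∧ k ≠ -n ∧ -k ≠ n ∧ -k ≠ -n := by
          rcases abs_cases n with ⟨he, _⟩ | ⟨he, _⟩ <;> constructor <;> try constructor
          all_goals omega
        have e1 : (k ∈ p ++ [n]) ↔ k ∈ p := by simp [hkn.1]
        have e2 : (-k ∈ p ++ [n]) ↔ -k ∈ p := by simp [hkn.2.2.1]
        have e3 : (k ∈ PySem.Set.add S n) ↔ k ∈ S := by
          rw [PySem.Set.mem_add]; simp [hkn.1]
        have e4 : (-k ∈ PySem.Set.add S n) ↔ -k ∈ S := by
          rw [PySem.Set.mem_add]; simp [hkn.2.2.1]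
        rw [e1, e2, e3, e4]
        exact h3 k hk (by rw [e1, e2] at hkp'; exact hkp')
    · by_cases hn0 : n = 0
      · subst hn0
        have h40 : ¬ (p.count 0 % 2 = 1) := fun h => hc (by simpa using h4.mpr h)
        have : (0:Int) ∈ PySem.Set.add S 0 := (PySem.Set.mem_add S 0 0).mpr (Or.inr rfl)
        rw [List.count_append]
        simp [this]; omega
      · have e : ((0:Int) ∈ PySem.Set.add S n) ↔ (0:Int) ∈ S := by
          rw [PySem.Set.mem_add]; simp; omega
        rw [e, List.count_append]
        simpa [hn0] using h4
    · rcases h5 with rfl | hp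
      · exact Or.inl rfl
      · exact Or.inr (Pk_append n hp)
    · intro k hk
      rcases hk with ⟨hk0, hk1, hk2⟩ | ⟨hk0, hk1⟩
      · by_cases hkabs : k = |n|
        · -- one of k, -k is n; the other is -n, which must already be in p, contradicting h3
          have hn0 : n ≠ 0 := by intro h; rw [h] at hkabs; simp at hkabs; omega
          have hmnp : -n ∈ p := by
            rcases abs_cases n with ⟨he, _⟩ | ⟨he, _⟩
            · have : -k ∈ p ++ [n] := hk2
              rw [hkabs, he] at this
              rcases List.mem_append.mp this with h | h
              · exact h
              · simp at h; omega
            · have : k ∈ p ++ [n] := hk1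
              rw [hkabs, he] at this
              rcases List.mem_append.mp this with h | h
              · simpa using h
              · simp at h; omega
          by_cases hnp : n ∈ p
          · have : Pk p k := by
              refine Or.inl ⟨hk0, ?_, ?_⟩
              · rcases abs_cases n with ⟨he, _⟩ | ⟨he, _⟩ <;> rw [hkabs, he]
                · exact hnp
                · exact hmnp
              · rcases abs_cases n with ⟨he, _⟩ | ⟨he, _⟩ <;> rw [hkabs, he]
                · exact hmnp
                · simpa using hnp
            exact h6 k this
          · exfalso
            have hnot : ¬ (k ∈ p ∧ -k ∈ p) := by
              rintro ⟨ha1, ha2⟩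
              rcases abs_cases n with ⟨he, _⟩ | ⟨he, _⟩
              · rw [hkabs, he] at ha1; exact hnp ha1
              · rw [hkabs, he] at ha2; exact hnp (by simpa using ha2)
            have h3k := h3 k hk0 hnot
            rcases abs_cases n with ⟨he, _⟩ | ⟨he, _⟩
            · apply hc
              have := h3k.2.mp (by rw [hkabs, he]; exact hmnp)
              rw [hkabs, he] at this
              exact this
            · apply hc
              have := h3k.1.mp (by rw [hkabs, he]; exact hmnp)
              rw [hkabs, he] at this
              exact this
        · have hkn : k ≠ n ∧ -k ≠ n := by
            rcases abs_cases n with ⟨he, _⟩ | ⟨he, _⟩ <;> constructor <;> omega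
          have : Pk p k := by
            refine Or.inl ⟨hk0, ?_, ?_⟩
            · rcases List.mem_append.mp hk1 with h | h
              · exact h
              · simp at h; omega
            · rcases List.mem_append.mp hk2 with h | h
              · exact h
              · simp at h; omega
          exact h6 k this
      · subst hk0
        rw [List.count_append] at hk1
        by_cases hn0 : n = 0
        · subst hn0
          have hone : ([(0:Int)].count 0) = 1 := rfl
          rw [hone] at hk1
          have h40 : ¬ (p.count 0 % 2 = 1) := fun h => hc (by simpa using h4.mpr h)
          have : 2 ≤ p.count 0 := by omega
          exact h6 0 (Or.inr ⟨rfl, this⟩)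
        · simp [hn0] at hk1
          exact h6 0 (Or.inr ⟨rfl, hk1⟩)

lemma foldA_inv (rest : List Int) : ∀ (p : List Int) (S : PySem.Set Int) (m : Int),
    InvA p S m →
    InvA (p ++ rest) (rest.foldl stepA (S, m)).1 (rest.foldl stepA (S, m)).2 := by
  induction rest with
  | nil => intro p S m h; simpa using h
  | cons n rest ih =>
    intro p S m h
    have h' := stepA_inv p S m n h
    have := ih (p ++ [n]) (stepA (S, m) n).1 (stepA (S, m) n).2 h'
    simpa [List.append_assoc] using this

lemma A_good (nums : List Int) : GoodOut nums (find_max_k_optimized nums) := by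
  have hbase : InvA [] ((PySem.Set.empty : PySem.Set Int)) (-1) := by
    refine ⟨?_, ?_, ?_, ?_, Or.inl rfl, ?_⟩
    · intro v hv; simp [PySem.Set.empty] at hv
    · intro v hv; simp [PySem.Set.empty] at hv
    · intro k _ _; simp [PySem.Set.empty]
    · simp [PySem.Set.empty]
    · intro k hk
      rcases hk with ⟨_, h, _⟩ | ⟨_, h⟩ <;> simp at h
  have := foldA_inv nums [] (PySem.Set.empty) (-1) hbase
  simp at this
  exact ⟨this.2.2.2.2.1, this.2.2.2.2.2⟩

-- B side: zero-sum pairs of positions in the sorted list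
def ZP (a : List Int) (i j : Nat) : Prop :=
  i < j ∧ j < a.length ∧ a.getD i 0 + a.getD j 0 = 0

lemma twoPtr_correct (a : List Int)
    (ha : ∀ p q : Nat, p ≤ q → q < a.length → a.getD p 0 ≤ a.getD q 0) :
    ∀ (d l r : Nat), r - l ≤ d → (l < r → r < a.length) →
      (∀ i j, ZP a i j → l ≤ i ∧ j ≤ r) →
      ((twoPtr a l r = -1 ∨ ∃ i j, ZP a i j ∧ twoPtr a l r = a.getD j 0) ∧
       ∀ i j, ZP a i j → a.getD j 0 ≤ twoPtr a l r) := by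
  intro d
  induction d with
  | zero =>
    intro l r hd hr hout
    have hlr : ¬ l < r := by omega
    rw [twoPtr, dif_neg hlr]
    refine ⟨Or.inl rfl, ?_⟩
    intro i j hzp
    have h1 := hout i j hzp
    obtain ⟨h2, -, -⟩ := hzp
    omega
  | succ d ih =>
    intro l r hd hr hout
    by_cases hlr : l < r
    · have hrlen : r < a.length := hr hlr
      rw [twoPtr, dif_pos hlr]
      by_cases hs : a.getD l 0 + a.getD r 0 = 0
      · simp only [hs, if_pos rfl]
        have hzp : ZP a l r := ⟨hlr, hrlen, hs⟩
        refine ⟨Or.inr ⟨l, r, hzp, by simp [hs]⟩, ?_⟩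
        intro i j hzp'
        have hj := (hout i j hzp').2
        obtain ⟨-, hjlen, -⟩ := hzp'
        simpa [hs] using ha j r hj hrlen
      · simp only [if_neg hs]
        by_cases hs2 : a.getD l 0 + a.getD r 0 < 0
        · simp only [if_pos hs2]
          apply ih (l + 1) r (by omega) (fun _ => hrlen)
          intro i j hzp
          obtain ⟨hi, hj⟩ := hout i j hzp
          refine ⟨?_, hj⟩
          rcases Nat.lt_or_ge l i with h | h
          · omega
          · exfalso
            have hil : i = l := by omega
            subst hil
            have hle : a.getD j 0 ≤ a.getD r 0 := ha j r hj hrlen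
            obtain ⟨-, -, hsum⟩ := hzp
            omega
        · simp only [if_neg hs2]
          apply ih l (r - 1) (by omega) (by intro h; omega)
          intro i j hzp
          obtain ⟨hi, hj⟩ := hout i j hzp
          refine ⟨hi, ?_⟩
          rcases Nat.lt_or_ge j r with h | h
          · omega
          · exfalso
            have hjr : j = r := by omega
            subst hjr
            obtain ⟨hij, hjlen, hsum⟩ := hzp
            have hle : a.getD l 0 ≤ a.getD i 0 := ha l i hi (by omega)
            omega
    · rw [twoPtr, dif_neg hlr]
      refine ⟨Or.inl rfl, ?_⟩
      intro i j hzp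
      have h1 := hout i j hzp
      have h2 := hzp.1
      omega

lemma two_zeros_count {a : List Int} {i j : Nat} (hij : i < j) (hj : j < a.length)
    (h0 : a[i]'(by omega) = 0) (h1 : a[j]'hj = 0) : 2 ≤ a.count 0 := by
  have hsub := List.map_getElem_sublist (l := a) (is := [⟨i, by omega⟩, ⟨j, hj⟩])
    (by simp; omega)
  have h2 := hsub.count_le 0
  simp [h0, h1] at h2
  omega

lemma count_two_zeros {a : List Int} (h : 2 ≤ a.count 0) :
    ∃ i j, i < j ∧ j < a.length ∧ a.getD i 0 = 0 ∧ a.getD j 0 = 0 := by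
  have hmem : (0:Int) ∈ a := by
    rw [← List.count_pos_iff]; omega
  obtain ⟨s, t, rfl⟩ := List.append_of_mem hmem
  rw [List.count_append, List.count_cons_self] at h
  have hst : 1 ≤ s.count 0 + t.count 0 := by omega
  have hlen : (s ++ 0 :: t).length = s.length + 1 + t.length := by simp; omega
  have hmid : (s ++ 0 :: t).getD s.length 0 = 0 := by
    rw [List.getD_eq_getElem _ _ (by omega)]
    rw [List.getElem_append_right (by omega)]
    simp
  rcases Nat.lt_or_ge 0 (s.count 0) with hs | hs
  · have h0s : (0:Int) ∈ s := List.count_pos_iff.mp hs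
    obtain ⟨u, hu, hs0⟩ := List.mem_iff_getElem.mp h0s
    refine ⟨u, s.length, by omega, by omega, ?_, hmid⟩
    rw [List.getD_eq_getElem _ _ (by omega)]
    rw [List.getElem_append_left (by omega)]
    exact hs0
  · have h0t : (0:Int) ∈ t := by
      rw [← List.count_pos_iff]; omega
    obtain ⟨u, hu, ht0⟩ := List.mem_iff_getElem.mp h0t
    refine ⟨s.length, s.length + 1 + u, by omega, by omega, hmid, ?_⟩
    rw [List.getD_eq_getElem?_getD, List.getElem?_append_right (by omega)]
    have he : s.length + 1 + u - s.length = u + 1 := by omega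
    rw [he, List.getElem?_cons_succ, List.getElem?_eq_getElem hu]
    simpa using ht0

lemma ZP_to_Pk (a : List Int)
    (ha : ∀ p q : Nat, p ≤ q → q < a.length → a.getD p 0 ≤ a.getD q 0)
    {i j : Nat} (h : ZP a i j) : Pk a (a.getD j 0) := by
  obtain ⟨hij, hj, hsum⟩ := h
  have hle : a.getD i 0 ≤ a.getD j 0 := ha i j (by omega) hj
  have hy0 : 0 ≤ a.getD j 0 := by omega
  rcases lt_or_eq_of_le hy0 with hy | hy
  · refine Or.inl ⟨hy, ?_, ?_⟩
    · rw [List.getD_eq_getElem _ _ hj]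
      exact List.getElem_mem hj
    · have : -(a.getD j 0) = a.getD i 0 := by omega
      rw [this, List.getD_eq_getElem _ _ (by omega)]
      exact List.getElem_mem (by omega)
  · refine Or.inr ⟨hy.symm, ?_⟩
    have hi0 : a[i]'(by omega) = 0 := by
      rw [← List.getD_eq_getElem _ (0:Int) (by omega)]; omega
    have hj0 : a[j]'hj = 0 := by
      rw [← List.getD_eq_getElem _ (0:Int) hj]; omega
    exact two_zeros_count hij hj hi0 hj0

lemma Pk_to_ZP (a : List Int)
    (ha : ∀ p q : Nat, p ≤ q → q < a.length → a.getD p 0 ≤ a.getD q 0)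
    {k : Int} (h : Pk a k) : ∃ i j, ZP a i j ∧ a.getD j 0 = k := by
  rcases h with ⟨hk0, hk1, hk2⟩ | ⟨hk0, hk1⟩
  · obtain ⟨j, hjl, hjv⟩ := List.mem_iff_getElem.mp hk1
    obtain ⟨i, hil, hiv⟩ := List.mem_iff_getElem.mp hk2
    have hdj : a.getD j 0 = k := by rw [List.getD_eq_getElem _ _ hjl]; exact hjv
    have hdi : a.getD i 0 = -k := by rw [List.getD_eq_getElem _ _ hil]; exact hiv
    have hij : i < j := by
      rcases Nat.lt_or_ge i j with h | h
      · exact h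
      · exfalso
        have := ha j i h hil
        omega
    exact ⟨i, j, ⟨hij, hjl, by omega⟩, hdj⟩
  · obtain ⟨i, j, hij, hj, hi0, hj0⟩ := count_two_zeros hk1
    exact ⟨i, j, ⟨hij, hj, by omega⟩, by omega⟩

lemma B_good (nums : List Int) : GoodOut nums (find_max_k_optimized_alt nums) := by
  set a := PySem.List.sorted nums (fun x => x) false with hadef
  have hperm : a.Perm nums := PySem.List.sorted_perm nums (fun x => x) false
  have hlen : a.length = nums.length := hperm.length_eq
  have ha : ∀ p q : Nat, p ≤ q → q < a.length → a.getD p 0 ≤ a.getD q 0 := by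
    intro p q hpq hq
    rw [List.getD_eq_getElem _ _ (by omega), List.getD_eq_getElem _ _ hq]
    exact PySem.List.sorted_id_getElem_mono nums hpq (by rw [← hadef]; exact hq)
  have hmain := twoPtr_correct a ha (nums.length - 1) 0 (nums.length - 1)
    (by omega)
    (by intro h; rw [hlen]; omega)
    (by intro i j hzp; obtain ⟨hij, hjlen, -⟩ := hzp; rw [hlen] at hjlen
        exact ⟨by omega, by omega⟩)
  obtain ⟨hval, hmax⟩ := hmain
  have hB : find_max_k_optimized_alt nums = twoPtr a 0 (nums.length - 1) := rfl
  constructor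
  · rcases hval with h | ⟨i, j, hzp, hv⟩
    · exact Or.inl (by rw [hB, h])
    · right
      rw [hB, hv, ← Pk_perm hperm]
      exact ZP_to_Pk a ha hzp
  · intro k hk
    rw [hB]
    rw [← Pk_perm hperm] at hk
    obtain ⟨i, j, hzp, hv⟩ := Pk_to_ZP a ha hk
    rw [← hv]
    exact hmax i j hzp

-- ===== VERDICT (by name: the statement is the Claim_ definition above) =====
theorem find_max_k_optimized_spec : Claim_equal_find_max_k_optimized := by
  intro nums _
  unfold Spec_find_max_k_optimized
  exact goodOut_unique (A_good nums) (B_good nums)
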